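-- pv_equiv track=rewrite | github.com/hamiltonparker/learning | HNFGen.py | base_ortho_2
-- ===== SOURCE A (Python) =====
-- import copy
--
-- def find_HNF_diagonal(size):
--
--     """Generats allowable values for the diagonal of an HNF
--        given a particular size
--
--     Args:
--         size (int): The determinate of the HNF matricies
--
--     Returns:
--         diags_list (list, int): a list of allowable values for a given size
--     """
--
--     diags_list = []
--     for i in range(size):
--         a = i + 1
--         if (size / a) % 1 == 0:
--             for j in range(size // a):
--                 c = j + 1
--                 if (size / a / c) % 1 == 0:
--                     f = size // a // c
--                     diags_list.append([a,c,f])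
--     return diags_list
--
-- def base_ortho_2(size):
--
--     """Generates symmetry preserving HNF's of a given size
--        for a base centered monoclinic basis
--
--     Args:
--         size (int): The determinate of the HNF matricies
--
--     Returns:
--         list (int): The generated HNF matricies
--     """
--
--     symHNF = []
--     diags = find_HNF_diagonal(size)
--     for i in diags:
--         a = i[0]
--         c = i[1]
--         f = i[2]
--         for j in range(c):
--             b = j
--             if ((a + 2 * b) / c) % 1 == 0:
--                 for k in range(f):
--                     e = k
--                     if (2 * e / f) % 1 == 0:
--                         if ((a + 2 * b) * e / (c * f)) % 1 == 0:
--                             for l in range(f):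
--                                 d = l
--                                 if (2 * d / f) % 1 == 0:
--                                     symHNF.append(copy.deepcopy([[a,0,0], [b,c,0], [d,e,f]]))
--     return symHNF
-- ===== SOURCE B (Python) =====
-- def _b_solutions(a, c):
--     # the 0 <= b < c with 2*b = -a (mod c), in ascending order
--     if c % 2 == 1:
--         return [(-a * ((c + 1) // 2)) % c]
--     if a % 2 == 1:
--         return []
--     b0 = (-(a // 2)) % (c // 2)
--     return [b0, b0 + c // 2]
--
--
-- def _halves(f):
--     # the 0 <= e < f with f | 2*e, in ascending order
--     return [0] + ([f // 2] if f % 2 == 0 else [])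
--
--
-- def base_ortho_2(size):
--     """Generates symmetry preserving HNF's of a given size (base centered
--     monoclinic basis): the divisor list is computed once and the admissible
--     b, e, d entries come from modular arithmetic instead of range scans."""
--     symHNF = []
--     if size < 1:
--         return symHNF
--     divs = [x for x in range(1, size + 1) if size % x == 0]
--     for a in divs:
--         m = size // a
--         for c in divs:
--             if c > m or m % c != 0:
--                 continue
--             f = m // c
--             bs = _b_solutions(a, c)
--             halves = _halves(f)
--             for b in bs:
--                 for e in halves:
--                     if ((a + 2 * b) * e) % (c * f) == 0:
--                         for d in halves:
--                             symHNF.append([[a, 0, 0], [b, c, 0], [d, e, f]])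
--     return symHNF
-- ===== Notes on version B (the rewrite author's own statement) =====
-- stated objective: faster
-- what changed: B computes the divisor list once and, per diagonal (a,c,f), obtains the valid b, e, d entries directly as the closed-form solutions of the congruences 2b=-a (mod c) and f|2e, f|2d, instead of A's rescanning range(size//a) per divisor and scanning range(c) and range(f) twice per diagonal.
import Mathlib
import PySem

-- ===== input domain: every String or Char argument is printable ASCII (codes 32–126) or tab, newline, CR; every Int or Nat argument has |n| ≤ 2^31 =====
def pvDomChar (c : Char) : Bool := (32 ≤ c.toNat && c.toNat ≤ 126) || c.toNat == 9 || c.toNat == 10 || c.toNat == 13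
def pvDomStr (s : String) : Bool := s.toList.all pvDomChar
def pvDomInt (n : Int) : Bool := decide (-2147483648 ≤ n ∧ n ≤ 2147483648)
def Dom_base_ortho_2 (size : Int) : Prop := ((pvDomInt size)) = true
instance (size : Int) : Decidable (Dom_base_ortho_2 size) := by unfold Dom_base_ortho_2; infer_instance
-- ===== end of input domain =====

-- B replaces A's three range scans per diagonal by the closed-form solutions of the
-- underlying congruences and builds the divisor list once (objective: faster).


-- ===== PORT A =====
-- Port note: A's float tests `(x / y) % 1 == 0` (y > 0 at every use) are ported as exact
-- integer divisibility `x % y == 0`, which is what they compute at these magnitudes.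
def find_HNF_diagonal (size : Int) : List (List Int) :=
  (PySem.List.pyRange 0 size 1).foldl (fun diags_list i =>
    let a := i + 1
    if PySem.Int.mod size a == 0 then
      (PySem.List.pyRange 0 (PySem.Int.floordiv size a) 1).foldl (fun diags_list j =>
        let c := j + 1
        if PySem.Int.mod (PySem.Int.floordiv size a) c == 0 then
          diags_list ++ [[a, c, PySem.Int.floordiv (PySem.Int.floordiv size a) c]]
        else diags_list) diags_list
    else diags_list) []

-- i[0]/i[1]/i[2] ported with pyGetD (exact: every element of diags has length 3)
def base_ortho_2 (size : Int) : List (List (List Int)) :=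
  (find_HNF_diagonal size).foldl (fun symHNF i =>
    let a := PySem.List.pyGetD i 0 0
    let c := PySem.List.pyGetD i 1 0
    let f := PySem.List.pyGetD i 2 0
    (PySem.List.pyRange 0 c 1).foldl (fun symHNF j =>
      let b := j
      if PySem.Int.mod (a + 2 * b) c == 0 then
        (PySem.List.pyRange 0 f 1).foldl (fun symHNF k =>
          let e := k
          if PySem.Int.mod (2 * e) f == 0 then
            if PySem.Int.mod ((a + 2 * b) * e) (c * f) == 0 then
              (PySem.List.pyRange 0 f 1).foldl (fun symHNF l =>
                let d := l
                if PySem.Int.mod (2 * d) f == 0 then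
                  symHNF ++ [[[a, 0, 0], [b, c, 0], [d, e, f]]]
                else symHNF) symHNF
            else symHNF
          else symHNF) symHNF
      else symHNF) symHNF) []

-- ===== PORT B =====
def pvBSolutions (a c : Int) : List Int :=
  if PySem.Int.mod c 2 == 1 then
    [PySem.Int.mod (-a * (PySem.Int.floordiv (c + 1) 2)) c]
  else if PySem.Int.mod a 2 == 1 then
    []
  else
    let b0 := PySem.Int.mod (-(PySem.Int.floordiv a 2)) (PySem.Int.floordiv c 2)
    [b0, b0 + PySem.Int.floordiv c 2]

def pvHalves (f : Int) : List Int :=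
  [0] ++ (if PySem.Int.mod f 2 == 0 then [PySem.Int.floordiv f 2] else [])

def base_ortho_2_alt (size : Int) : List (List (List Int)) :=
  if size < 1 then []
  else
    let divs := (PySem.List.pyRange 1 (size + 1) 1).filter (fun x => PySem.Int.mod size x == 0)
    divs.foldl (fun symHNF a =>
      let m := PySem.Int.floordiv size a
      divs.foldl (fun symHNF c =>
        if m < c ∨ PySem.Int.mod m c ≠ 0 then symHNF
        else
          let f := PySem.Int.floordiv m c
          let bs := pvBSolutions a c
          let halves := pvHalves f
          bs.foldl (fun symHNF b =>
            halves.foldl (fun symHNF e =>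
              if PySem.Int.mod ((a + 2 * b) * e) (c * f) == 0 then
                halves.foldl (fun symHNF d =>
                  symHNF ++ [[[a, 0, 0], [b, c, 0], [d, e, f]]]) symHNF
              else symHNF) symHNF) symHNF) symHNF) []

-- ===== PRECONDITION & SPEC =====
def Spec_base_ortho_2 (size : Int) (out : List (List (List Int))) : Prop := out = base_ortho_2_alt size
instance (size : Int) (out : List (List (List Int))) : Decidable (Spec_base_ortho_2 size out) := by unfold Spec_base_ortho_2; infer_instance

-- ===== CLAIM (what is proved, stated in full; the proofs are below) =====
def Claim_equal_base_ortho_2 : Prop := ∀ (size : Int), Dom_base_ortho_2 size → Spec_base_ortho_2 size (base_ortho_2 size)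

-- ===== LEMMAS AND PROOFS =====

-- proof-side vocabulary
def pvMat (a b c d e f : Int) : List (List Int) := [[a, 0, 0], [b, c, 0], [d, e, f]]

def pvDivs (n : Int) : List Int :=
  (PySem.List.pyRange 1 (n + 1) 1).filter (fun x => PySem.Int.mod n x == 0)

def pvBScan (a c : Int) : List Int :=
  (PySem.List.pyRange 0 c 1).filter (fun b => PySem.Int.mod (a + 2 * b) c == 0)

def pvDScan (f : Int) : List Int :=
  (PySem.List.pyRange 0 f 1).filter (fun d => PySem.Int.mod (2 * d) f == 0)

def pvBodyA (a c f : Int) : List (List (List Int)) :=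
  (pvBScan a c).flatMap (fun b =>
    ((PySem.List.pyRange 0 f 1).filter
        (fun e => PySem.Int.mod (2 * e) f == 0 && (PySem.Int.mod ((a + 2 * b) * e) (c * f) == 0))).flatMap
      (fun e => (pvDScan f).map (fun d => pvMat a b c d e f)))

def pvBodyB (a c f : Int) : List (List (List Int)) :=
  (pvBSolutions a c).flatMap (fun b =>
    (pvHalves f).flatMap (fun e =>
      if PySem.Int.mod ((a + 2 * b) * e) (c * f) == 0 then
        (pvHalves f).map (fun d => pvMat a b c d e f)
      else []))

-- generic list glue
theorem pv_flatMap_if_filter {α β} (l : List α) (p : α → Bool) (g : α → List β) :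
    l.flatMap (fun x => if p x then g x else []) = (l.filter p).flatMap g := by
  induction l with
  | nil => rfl
  | cons x xs ih => by_cases h : p x <;> simp [h, ih]

theorem pv_filter_range_one (n v : Nat) (p : Nat → Bool) (hv : v < n) (hp : p v = true)
    (hu : ∀ x, x < n → p x = true → x = v) : (List.range n).filter p = [v] := by
  induction n with
  | zero => omega
  | succ n ih =>
    rw [List.range_succ, List.filter_append]
    by_cases hvn : v = n
    · have h1 : (List.range n).filter p = [] := by
        rw [List.filter_eq_nil_iff]
        intro x hx hpx
        have := hu x (by simp at hx; omega) hpx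
        simp at hx; omega
      subst hvn; simp [h1, hp]
    · have hvlt : v < n := by omega
      have h1 := ih hvlt (fun x hx hpx => hu x (by omega) hpx)
      have h2 : p n = false := by
        by_contra h
        have := hu n (by omega) (by simpa using h)
        omega
      simp [h1, h2]

theorem pv_filter_range_two (n v1 v2 : Nat) (p : Nat → Bool) (h12 : v1 < v2) (hv : v2 < n)
    (hp1 : p v1 = true) (hp2 : p v2 = true)
    (hu : ∀ x, x < n → p x = true → x = v1 ∨ x = v2) : (List.range n).filter p = [v1, v2] := by
  induction n with
  | zero => omega
  | succ n ih =>
    rw [List.range_succ, List.filter_append]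
    by_cases hvn : v2 = n
    · have h1 : (List.range n).filter p = [v1] := by
        apply pv_filter_range_one n v1 p (by omega) hp1
        intro x hx hpx
        rcases hu x (by omega) hpx with h | h
        · exact h
        · omega
      subst hvn; simp [h1, hp2]
    · have h1 := ih (by omega) (fun x hx hpx => hu x (by omega) hpx)
      have h2 : p n = false := by
        by_contra h
        rcases hu n (by omega) (by simpa using h) with h' | h' <;> omega
      simp [h1, h2]

theorem pv_filter_pyRange_one (n v : Int) (p : Int → Bool) (h0 : 0 ≤ v) (hv : v < n)
    (hp : p v = true) (hu : ∀ x, 0 ≤ x → x < n → p x = true → x = v) :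
    (PySem.List.pyRange 0 n 1).filter p = [v] := by
  rw [PySem.List.pyRange_one, List.filter_map]
  have : (List.range (n - 0).toNat).filter (p ∘ fun k : Nat => (0 : Int) + k) = [v.toNat] := by
    apply pv_filter_range_one
    · omega
    · simpa [Int.toNat_of_nonneg h0] using hp
    · intro x hx hpx
      have := hu x (by omega) (by omega) (by simpa using hpx)
      omega
  rw [this]
  simp [Int.toNat_of_nonneg h0]

theorem pv_filter_pyRange_two (n v1 v2 : Int) (p : Int → Bool) (h0 : 0 ≤ v1) (h12 : v1 < v2)
    (hv : v2 < n) (hp1 : p v1 = true) (hp2 : p v2 = true)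
    (hu : ∀ x, 0 ≤ x → x < n → p x = true → x = v1 ∨ x = v2) :
    (PySem.List.pyRange 0 n 1).filter p = [v1, v2] := by
  rw [PySem.List.pyRange_one, List.filter_map]
  have : (List.range (n - 0).toNat).filter (p ∘ fun k : Nat => (0 : Int) + k) = [v1.toNat, v2.toNat] := by
    apply pv_filter_range_two
    · omega
    · omega
    · simpa [Int.toNat_of_nonneg h0] using hp1
    · simpa [Int.toNat_of_nonneg (by omega : (0:Int) ≤ v2)] using hp2
    · intro x hx hpx
      have := hu x (by omega) (by omega) (by simpa using hpx)
      omega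
  rw [this]
  simp [Int.toNat_of_nonneg h0, Int.toNat_of_nonneg (by omega : (0:Int) ≤ v2)]

-- a member of pvDivs n is a positive divisor, and conversely
theorem pv_mem_divs {n x : Int} (hn : 1 ≤ n) : x ∈ pvDivs n ↔ 1 ≤ x ∧ x ∣ n := by
  unfold pvDivs
  rw [List.mem_filter, PySem.List.mem_pyRange_one]
  constructor
  · rintro ⟨⟨h1, h2⟩, h3⟩
    refine ⟨h1, ?_⟩
    rw [← PySem.Int.mod_eq_zero_iff_dvd]
    simpa using h3
  · rintro ⟨h1, h2⟩
    have hle : x ≤ n := Int.le_of_dvd (by omega) h2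
    refine ⟨⟨h1, by omega⟩, ?_⟩
    simpa using (PySem.Int.mod_eq_zero_iff_dvd n x).mpr h2

-- more generic glue
theorem pv_flatMap_ite_filter {α β} (l : List α) (p : α → Prop) [DecidablePred p] (g : α → List β) :
    l.flatMap (fun x => if p x then g x else []) = (l.filter (fun x => decide (p x))).flatMap g := by
  induction l with
  | nil => rfl
  | cons x xs ih => by_cases h : p x <;> simp [h, ih]

theorem pv_foldl_emit {α β} (l : List α) (f : List β → α → List β) (g : α → List β)
    (h : ∀ S x, f S x = S ++ g x) (s : List β) : l.foldl f s = s ++ l.flatMap g := by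
  induction l generalizing s with
  | nil => simp
  | cons x xs ih => rw [List.foldl_cons, h, ih]; simp

theorem pv_map_filter_eq_flatMap {α β} (l : List α) (p : α → Bool) (g : α → β) :
    (l.filter p).map g = l.flatMap (fun x => if p x then [g x] else []) := by
  rw [pv_flatMap_if_filter]
  induction (l.filter p) with
  | nil => rfl
  | cons x xs ih => simp [ih]

theorem pv_shift {β} (n : Int) (h : Int → List β) :
    (PySem.List.pyRange 0 n 1).flatMap (fun i => h (i + 1)) = (PySem.List.pyRange 1 (n + 1) 1).flatMap h := by
  rw [PySem.List.pyRange_one 0 n, PySem.List.pyRange_one 1 (n + 1), List.flatMap_map, List.flatMap_map]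
  have hn : (n + 1 - 1).toNat = (n - 0).toNat := by omega
  rw [hn]
  apply List.flatMap_congr
  intro k _
  congr 1
  omega

theorem pv_shift_fm {β} (n : Int) (q : Int → Bool) (r : Int → β) :
    ((PySem.List.pyRange 0 n 1).filter (fun j => q (j + 1))).map (fun j => r (j + 1)) =
      ((PySem.List.pyRange 1 (n + 1) 1).filter q).map r := by
  rw [pv_map_filter_eq_flatMap, pv_map_filter_eq_flatMap,
    pv_shift n (fun x => if q x then [r x] else [])]

-- positive exact quotients
theorem pv_div_fact {n a : Int} (hn : 1 ≤ n) (ha : 1 ≤ a) (hdvd : a ∣ n) :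
    1 ≤ PySem.Int.floordiv n a ∧ PySem.Int.floordiv n a ∣ n := by
  obtain ⟨k, hk⟩ := hdvd
  have he : PySem.Int.floordiv n a = n / a := PySem.Int.floordiv_eq_ediv_of_pos (by omega)
  rw [he, hk, Int.mul_ediv_cancel_left _ (by omega : a ≠ 0)]
  constructor
  · nlinarith
  · exact ⟨a, by ring⟩

-- K1: filtering the divisors of size down to those dividing m (m ∣ size, 1 ≤ m) yields pvDivs m
theorem pv_filter_divs (size m : Int) (hsz : 1 ≤ size) (hm : 1 ≤ m) (hdvd : m ∣ size) :
    (pvDivs size).filter (fun c => decide (c ≤ m ∧ PySem.Int.mod m c = 0)) = pvDivs m := by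
  unfold pvDivs
  rw [List.filter_filter]
  have hmle : m ≤ size := Int.le_of_dvd (by omega) hdvd
  rw [PySem.List.pyRange_one_append 1 (m + 1) (size + 1) (by omega) (by omega), List.filter_append]
  have h2 : (PySem.List.pyRange (m + 1) (size + 1) 1).filter
      (fun x => decide (x ≤ m ∧ PySem.Int.mod m x = 0) && (PySem.Int.mod size x == 0)) = [] := by
    rw [List.filter_eq_nil_iff]
    intro x hx
    rw [PySem.List.mem_pyRange_one] at hx
    simp only [Bool.and_eq_true, decide_eq_true_eq, not_and]
    rintro ⟨hxm, -⟩
    omega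
  rw [h2, List.append_nil]
  apply List.filter_congr
  intro x hx
  rw [PySem.List.mem_pyRange_one] at hx
  by_cases hxm : x ∣ m
  · have hxs : x ∣ size := dvd_trans hxm hdvd
    have hxlem : x ≤ m := Int.le_of_dvd (by omega) hxm
    simp [(PySem.Int.mod_eq_zero_iff_dvd m x).mpr hxm, (PySem.Int.mod_eq_zero_iff_dvd size x).mpr hxs, hxlem]
  · have hm0 : ¬ (PySem.Int.mod m x = 0) := fun h => hxm ((PySem.Int.mod_eq_zero_iff_dvd m x).mp h)
    simp [hm0]

-- K2: the scan over range(c) equals the closed-form solution list (1 ≤ c)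
theorem pv_bscan_eq (a c : Int) (hc : 1 ≤ c) : pvBScan a c = pvBSolutions a c := by
  have hcpos : (0:Int) < c := by omega
  have hmodc : ∀ x : Int, PySem.Int.mod x c = x % c := fun x => PySem.Int.mod_eq_emod_of_pos hcpos
  have hmod2 : ∀ x : Int, PySem.Int.mod x 2 = x % 2 := fun x => PySem.Int.mod_eq_emod_of_pos (by omega)
  unfold pvBScan pvBSolutions
  by_cases hodd : PySem.Int.mod c 2 == 1
  · -- c odd: unique solution
    rw [if_pos hodd]
    have hc2 : c % 2 = 1 := by rw [hmod2] at hodd; simpa using hodd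
    set ch : Int := PySem.Int.floordiv (c + 1) 2 with hh
    have hhe : ch = (c + 1) / 2 := PySem.Int.floordiv_eq_ediv_of_pos (by omega)
    have h2h : 2 * ch = c + 1 := by rw [hhe]; omega
    set v : Int := PySem.Int.mod (-a * ch) c with hvdefn
    have hvemod : v = (-a * ch) % c := by rw [hvdefn, hmodc]
    set q : Int := (-a * ch) / c with hq
    clear_value ch q
    have hvdef : v = -a * ch - c * q := by rw [hvemod, Int.emod_def, hq]
    have hdvdv : c ∣ a + 2 * v := ⟨-a - 2 * q, by linear_combination 2 * hvdef - a * h2h⟩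
    apply pv_filter_pyRange_one
    · rw [hvemod]; exact Int.emod_nonneg _ (by omega)
    · rw [hvemod]; exact Int.emod_lt_of_pos _ hcpos
    · simp only [hmodc, beq_iff_eq]
      exact Int.emod_eq_zero_of_dvd hdvdv
    · intro x hx0 hxc hpx
      simp only [hmodc, beq_iff_eq] at hpx
      have hdx : c ∣ a + 2 * x := Int.dvd_of_emod_eq_zero hpx
      obtain ⟨k, hk⟩ := Int.dvd_sub hdx hdvdv
      have h2k : (2:Int) ∣ k := by
        have h2ck : (2:Int) ∣ c * k := ⟨x - v, by linarith⟩
        rcases (Int.prime_two.dvd_mul.mp h2ck) with h | h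
        · exfalso; omega
        · exact h
      obtain ⟨k', hk'⟩ := h2k
      have hxv : x - v = c * k' := by
        have : 2 * (x - v) = 2 * (c * k') := by linear_combination hk + c * hk'
        linarith
      have hb : |x - v| < c := by
        have hv0 : 0 ≤ v := by rw [hvemod]; exact Int.emod_nonneg _ (by omega)
        have hvc : v < c := by rw [hvemod]; exact Int.emod_lt_of_pos _ hcpos
        rw [abs_lt]; omega
      have := Int.eq_zero_of_abs_lt_dvd ⟨k', hxv⟩ hb
      omega
  · rw [if_neg hodd]
    have hc2 : c % 2 = 0 := by
      rw [hmod2] at hodd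
      have := Int.emod_emod_of_dvd c (dvd_refl 2)
      have h1 : 0 ≤ c % 2 := Int.emod_nonneg _ (by omega)
      have h2 : c % 2 < 2 := Int.emod_lt_of_pos _ (by omega)
      simp at hodd; omega
    have h2c : (2:Int) ∣ c := by omega
    by_cases haodd : PySem.Int.mod a 2 == 1
    · -- c even, a odd: no solutions
      rw [if_pos haodd]
      have ha2 : a % 2 = 1 := by rw [hmod2] at haodd; simpa using haodd
      rw [List.filter_eq_nil_iff]
      intro x hx hpx
      simp only [hmodc, beq_iff_eq] at hpx
      have hdx : c ∣ a + 2 * x := Int.dvd_of_emod_eq_zero hpx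
      have : (2:Int) ∣ a + 2 * x := dvd_trans h2c hdx
      omega
    · -- c even, a even: two solutions
      rw [if_neg haodd]
      have ha2 : a % 2 = 0 := by
        rw [hmod2] at haodd
        have h1 : 0 ≤ a % 2 := Int.emod_nonneg _ (by omega)
        have h2 : a % 2 < 2 := Int.emod_lt_of_pos _ (by omega)
        simp at haodd; omega
      simp only []
      set c2 : Int := PySem.Int.floordiv c 2 with hc2def
      have hc2e : c2 = c / 2 := PySem.Int.floordiv_eq_ediv_of_pos (by omega)
      have h2c2 : 2 * c2 = c := by rw [hc2e]; omega
      have hc2pos : 0 < c2 := by omega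
      set a2 : Int := PySem.Int.floordiv a 2 with ha2def
      have ha2e : a2 = a / 2 := PySem.Int.floordiv_eq_ediv_of_pos (by omega)
      have h2a2 : 2 * a2 = a := by rw [ha2e]; omega
      set b0 : Int := PySem.Int.mod (-a2) c2 with hb0defn
      have hb0emod : b0 = (-a2) % c2 := by rw [hb0defn]; exact PySem.Int.mod_eq_emod_of_pos hc2pos
      set q : Int := (-a2) / c2 with hq
      clear_value q
      have hb0def : b0 = -a2 - c2 * q := by rw [hb0emod, Int.emod_def, hq]
      have hb00 : 0 ≤ b0 := by rw [hb0emod]; exact Int.emod_nonneg _ (by omega)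
      have hb0c2 : b0 < c2 := by rw [hb0emod]; exact Int.emod_lt_of_pos _ hc2pos
      have hdvd1 : c ∣ a + 2 * b0 := ⟨-q, by linear_combination 2 * hb0def - h2a2 - q * h2c2⟩
      have hdvd2 : c ∣ a + 2 * (b0 + c2) := ⟨1 - q, by linear_combination 2 * hb0def - h2a2 - q * h2c2 + h2c2⟩
      apply pv_filter_pyRange_two
      · exact hb00
      · omega
      · omega
      · simp only [hmodc, beq_iff_eq]; exact Int.emod_eq_zero_of_dvd hdvd1
      · simp only [hmodc, beq_iff_eq]; exact Int.emod_eq_zero_of_dvd hdvd2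
      · intro x hx0 hxc hpx
        simp only [hmodc, beq_iff_eq] at hpx
        have hdx : c ∣ a + 2 * x := Int.dvd_of_emod_eq_zero hpx
        obtain ⟨k, hk⟩ := Int.dvd_sub hdx hdvd1
        have hxb : x - b0 = c2 * k := by
          have : 2 * (x - b0) = 2 * (c2 * k) := by linear_combination hk - k * h2c2
          linarith
        have hk01 : k = 0 ∨ k = 1 := by
          rcases lt_trichotomy k 0 with h | h | h
          · exfalso; nlinarith
          · left; exact h
          · rcases lt_trichotomy k 1 with h' | h' | h'
            · omega
            · right; exact h'
            · exfalso; nlinarith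
        rcases hk01 with h | h <;> subst h <;> simp at hxb <;> [left; right] <;> omega


-- K3: the scan for f | 2*d equals pvHalves f (1 ≤ f)
theorem pv_dscan_eq (f : Int) (hf : 1 ≤ f) : pvDScan f = pvHalves f := by
  have hfpos : (0:Int) < f := by omega
  have h1 : pvDScan f = pvBScan 0 f := by
    unfold pvDScan pvBScan
    apply List.filter_congr
    intro x _
    norm_num
  rw [h1, pv_bscan_eq 0 f hf]
  unfold pvBSolutions pvHalves
  have hm2 : PySem.Int.mod f 2 = f % 2 := PySem.Int.mod_eq_emod_of_pos (by omega)
  by_cases h : PySem.Int.mod f 2 == 1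
  · have hf2 : f % 2 = 1 := by rw [hm2] at h; simpa using h
    rw [if_pos h, if_neg (by rw [hm2]; simp [hf2])]
    simp [PySem.Int.mod_eq_emod_of_pos hfpos]
  · have hf2 : f % 2 = 0 := by
      rw [hm2] at h
      have h1' : 0 ≤ f % 2 := Int.emod_nonneg _ (by omega)
      have h2' : f % 2 < 2 := Int.emod_lt_of_pos _ (by omega)
      simp at h
      omega
    have hfe : 2 ≤ f := by omega
    have hc2e : PySem.Int.floordiv f 2 = f / 2 := PySem.Int.floordiv_eq_ediv_of_pos (by omega)
    have hc2pos : 0 < PySem.Int.floordiv f 2 := by rw [hc2e]; omega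
    rw [if_neg h, if_neg (by norm_num), if_pos (by rw [hm2]; simp [hf2])]
    have h02 : PySem.Int.floordiv (0:Int) 2 = 0 := by decide
    rw [h02]
    have hz : PySem.Int.mod (-(0:Int)) (PySem.Int.floordiv f 2) = 0 := by
      rw [PySem.Int.mod_eq_emod_of_pos hc2pos]
      simp
    rw [hz]
    simp

-- A side, bottom-up
theorem pv_A_dfold (a b c e f : Int) (s : List (List (List Int))) :
    (PySem.List.pyRange 0 f 1).foldl (fun S l =>
      if PySem.Int.mod (2 * l) f == 0 then S ++ [[[a, 0, 0], [b, c, 0], [l, e, f]]] else S) s =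
    s ++ (pvDScan f).map (fun d => pvMat a b c d e f) := by
  rw [PySem.List.foldl_append_if]
  rfl

theorem pv_A_efold (a b c f : Int) (s : List (List (List Int))) :
    (PySem.List.pyRange 0 f 1).foldl (fun S k =>
      if PySem.Int.mod (2 * k) f == 0 then
        if PySem.Int.mod ((a + 2 * b) * k) (c * f) == 0 then
          (PySem.List.pyRange 0 f 1).foldl (fun S' l =>
            if PySem.Int.mod (2 * l) f == 0 then S' ++ [[[a, 0, 0], [b, c, 0], [l, k, f]]] else S') S
        else S
      else S) s =
    s ++ ((PySem.List.pyRange 0 f 1).filter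
        (fun e => PySem.Int.mod (2 * e) f == 0 && (PySem.Int.mod ((a + 2 * b) * e) (c * f) == 0))).flatMap
      (fun e => (pvDScan f).map (fun d => pvMat a b c d e f)) := by
  rw [pv_foldl_emit _ _ (fun k =>
    if PySem.Int.mod (2 * k) f == 0 && (PySem.Int.mod ((a + 2 * b) * k) (c * f) == 0) then
      (pvDScan f).map (fun d => pvMat a b c d k f) else []) ?_, pv_flatMap_if_filter]
  intro S k
  by_cases h1 : PySem.Int.mod (2 * k) f == 0 <;> by_cases h2 : PySem.Int.mod ((a + 2 * b) * k) (c * f) == 0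
  · rw [if_pos h1, if_pos h2, pv_A_dfold]
    simp [h1, h2]
  · rw [if_pos h1, if_neg h2]
    simp [h1, h2]
  · rw [if_neg h1]
    simp [h1]
  · rw [if_neg h1]
    simp [h1]

theorem pv_A_bfold (a c f : Int) (s : List (List (List Int))) :
    (PySem.List.pyRange 0 c 1).foldl (fun S j =>
      if PySem.Int.mod (a + 2 * j) c == 0 then
        (PySem.List.pyRange 0 f 1).foldl (fun S' k =>
          if PySem.Int.mod (2 * k) f == 0 then
            if PySem.Int.mod ((a + 2 * j) * k) (c * f) == 0 then
              (PySem.List.pyRange 0 f 1).foldl (fun S'' l =>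
                if PySem.Int.mod (2 * l) f == 0 then S'' ++ [[[a, 0, 0], [j, c, 0], [l, k, f]]] else S'') S'
            else S'
          else S') S
      else S) s = s ++ pvBodyA a c f := by
  rw [pv_foldl_emit _ _ (fun j =>
    if PySem.Int.mod (a + 2 * j) c == 0 then
      ((PySem.List.pyRange 0 f 1).filter
          (fun e => PySem.Int.mod (2 * e) f == 0 && (PySem.Int.mod ((a + 2 * j) * e) (c * f) == 0))).flatMap
        (fun e => (pvDScan f).map (fun d => pvMat a j c d e f)) else []) ?_, pv_flatMap_if_filter]
  · rfl
  · intro S j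
    by_cases h1 : PySem.Int.mod (a + 2 * j) c == 0
    · rw [if_pos h1, pv_A_efold]
      simp [h1]
    · rw [if_neg h1]
      simp [h1]

theorem pv_find_eq (size : Int) : find_HNF_diagonal size =
    (pvDivs size).flatMap (fun a =>
      (pvDivs (PySem.Int.floordiv size a)).map (fun c =>
        [a, c, PySem.Int.floordiv (PySem.Int.floordiv size a) c])) := by
  unfold find_HNF_diagonal
  rw [pv_foldl_emit _ _ (fun i =>
    if PySem.Int.mod size (i + 1) == 0 then
      ((PySem.List.pyRange 0 (PySem.Int.floordiv size (i + 1)) 1).filter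
          (fun j => PySem.Int.mod (PySem.Int.floordiv size (i + 1)) (j + 1) == 0)).map
        (fun j => [i + 1, j + 1, PySem.Int.floordiv (PySem.Int.floordiv size (i + 1)) (j + 1)]) else []) ?_]
  · rw [List.nil_append,
      pv_shift size (fun A => if PySem.Int.mod size A == 0 then
        ((PySem.List.pyRange 0 (PySem.Int.floordiv size A) 1).filter
            (fun j => PySem.Int.mod (PySem.Int.floordiv size A) (j + 1) == 0)).map
          (fun j => [A, j + 1, PySem.Int.floordiv (PySem.Int.floordiv size A) (j + 1)]) else []),
      pv_flatMap_if_filter]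
    apply List.flatMap_congr
    intro a _
    exact pv_shift_fm (PySem.Int.floordiv size a)
      (fun cc => PySem.Int.mod (PySem.Int.floordiv size a) cc == 0)
      (fun cc => [a, cc, PySem.Int.floordiv (PySem.Int.floordiv size a) cc])
  · intro S i
    by_cases h1 : PySem.Int.mod size (i + 1) == 0
    · rw [if_pos h1, PySem.List.foldl_append_if]
      simp [h1]
    · rw [if_neg h1]
      simp [h1]

-- A in flatMap form
theorem pv_A_eq (size : Int) : base_ortho_2 size =
    (pvDivs size).flatMap (fun a =>
      (pvDivs (PySem.Int.floordiv size a)).flatMap (fun c =>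
        pvBodyA a c (PySem.Int.floordiv (PySem.Int.floordiv size a) c))) := by
  unfold base_ortho_2
  rw [pv_foldl_emit _ _ (fun i =>
    pvBodyA (PySem.List.pyGetD i 0 0) (PySem.List.pyGetD i 1 0) (PySem.List.pyGetD i 2 0)) ?_]
  · rw [List.nil_append, pv_find_eq, List.flatMap_assoc]
    apply List.flatMap_congr
    intro a _
    rw [List.flatMap_map]
    apply List.flatMap_congr
    intro c _
    have h0 : PySem.List.pyGetD [a, c, PySem.Int.floordiv (PySem.Int.floordiv size a) c] (0:Int) (0:Int) = a := by
      simp [pysem]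
    have h1 : PySem.List.pyGetD [a, c, PySem.Int.floordiv (PySem.Int.floordiv size a) c] (1:Int) (0:Int) = c := by
      simp [pysem]
    have h2 : PySem.List.pyGetD [a, c, PySem.Int.floordiv (PySem.Int.floordiv size a) c] (2:Int) (0:Int) =
        PySem.Int.floordiv (PySem.Int.floordiv size a) c := by
      simp [pysem]
    rw [h0, h1, h2]
  · intro S i
    exact pv_A_bfold (PySem.List.pyGetD i 0 0) (PySem.List.pyGetD i 1 0) (PySem.List.pyGetD i 2 0) S

-- B side, bottom-up
theorem pv_B_efold (a b c f : Int) (hs : List Int) (s : List (List (List Int))) :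
    hs.foldl (fun S e =>
      if PySem.Int.mod ((a + 2 * b) * e) (c * f) == 0 then
        hs.foldl (fun S' d => S' ++ [[[a, 0, 0], [b, c, 0], [d, e, f]]]) S
      else S) s =
    s ++ hs.flatMap (fun e =>
      if PySem.Int.mod ((a + 2 * b) * e) (c * f) == 0 then hs.map (fun d => pvMat a b c d e f) else []) := by
  apply pv_foldl_emit
  intro S e
  by_cases h : PySem.Int.mod ((a + 2 * b) * e) (c * f) == 0
  · rw [if_pos h, PySem.List.foldl_append_singleton_eq_map, if_pos h]
    rfl
  · rw [if_neg h, if_neg h, List.append_nil]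

theorem pv_B_bfold (a c f : Int) (s : List (List (List Int))) :
    (pvBSolutions a c).foldl (fun S b =>
      (pvHalves f).foldl (fun S' e =>
        if PySem.Int.mod ((a + 2 * b) * e) (c * f) == 0 then
          (pvHalves f).foldl (fun S'' d => S'' ++ [[[a, 0, 0], [b, c, 0], [d, e, f]]]) S'
        else S') S) s = s ++ pvBodyB a c f := by
  apply pv_foldl_emit
  intro S b
  exact pv_B_efold a b c f (pvHalves f) S

-- B in flatMap form (size ≥ 1)
theorem pv_B_eq (size : Int) (hsz : 1 ≤ size) : base_ortho_2_alt size =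
    (pvDivs size).flatMap (fun a =>
      (pvDivs (PySem.Int.floordiv size a)).flatMap (fun c =>
        pvBodyB a c (PySem.Int.floordiv (PySem.Int.floordiv size a) c))) := by
  unfold base_ortho_2_alt
  rw [if_neg (by omega : ¬ size < 1)]
  rw [show ((PySem.List.pyRange 1 (size + 1) 1).filter (fun x => PySem.Int.mod size x == 0)) = pvDivs size
    from rfl]
  rw [pv_foldl_emit _ _ (fun a =>
    ((pvDivs size).filter
        (fun c => decide (c ≤ PySem.Int.floordiv size a ∧ PySem.Int.mod (PySem.Int.floordiv size a) c = 0))).flatMap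
      (fun c => pvBodyB a c (PySem.Int.floordiv (PySem.Int.floordiv size a) c))) ?_]
  · rw [List.nil_append]
    apply List.flatMap_congr
    intro a ha
    obtain ⟨ha1, hadvd⟩ := (pv_mem_divs hsz).mp ha
    obtain ⟨hm1, hmdvd⟩ := pv_div_fact hsz ha1 hadvd
    rw [pv_filter_divs size (PySem.Int.floordiv size a) hsz hm1 hmdvd]
  · intro S a
    rw [pv_foldl_emit _ _ (fun c =>
      if c ≤ PySem.Int.floordiv size a ∧ PySem.Int.mod (PySem.Int.floordiv size a) c = 0 then
        pvBodyB a c (PySem.Int.floordiv (PySem.Int.floordiv size a) c) else []) ?_]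
    · rw [pv_flatMap_ite_filter]
    · intro S' cc
      dsimp only
      by_cases hcond : cc ≤ PySem.Int.floordiv size a ∧ PySem.Int.mod (PySem.Int.floordiv size a) cc = 0
      · rw [if_neg (by push Not; exact ⟨by omega, hcond.2⟩), if_pos hcond, pv_B_bfold]
      · rw [if_pos (by by_contra hcon; push Not at hcon; exact hcond ⟨by omega, hcon.2⟩),
          if_neg hcond, List.append_nil]

-- the two per-diagonal bodies agree
theorem pv_body_eq (a c f : Int) (hc : 1 ≤ c) (hf : 1 ≤ f) : pvBodyA a c f = pvBodyB a c f := by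
  unfold pvBodyA pvBodyB
  rw [pv_bscan_eq a c hc]
  apply List.flatMap_congr
  intro b _
  have hfilter : (PySem.List.pyRange 0 f 1).filter
      (fun e => PySem.Int.mod (2 * e) f == 0 && (PySem.Int.mod ((a + 2 * b) * e) (c * f) == 0)) =
      (pvHalves f).filter (fun e => PySem.Int.mod ((a + 2 * b) * e) (c * f) == 0) := by
    rw [show ((PySem.List.pyRange 0 f 1).filter
        (fun e => PySem.Int.mod (2 * e) f == 0 && (PySem.Int.mod ((a + 2 * b) * e) (c * f) == 0))) =
        ((PySem.List.pyRange 0 f 1).filter (fun e => PySem.Int.mod (2 * e) f == 0)).filter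
          (fun e => PySem.Int.mod ((a + 2 * b) * e) (c * f) == 0) from ?_]
    · rw [show ((PySem.List.pyRange 0 f 1).filter (fun e => PySem.Int.mod (2 * e) f == 0)) = pvDScan f
        from rfl, pv_dscan_eq f hf]
    · rw [List.filter_filter]
      apply List.filter_congr
      intro x _
      rw [Bool.and_comm]
  rw [hfilter, ← pv_flatMap_if_filter]
  apply List.flatMap_congr
  intro e _
  by_cases h : PySem.Int.mod ((a + 2 * b) * e) (c * f) == 0 <;> simp [h, pv_dscan_eq f hf]

-- ===== VERDICT (by name: the statement is the Claim_ definition above) =====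
theorem base_ortho_2_spec : Claim_equal_base_ortho_2 := by
  intro size _
  unfold Spec_base_ortho_2
  by_cases hsz : 1 ≤ size
  · rw [pv_A_eq, pv_B_eq size hsz]
    apply List.flatMap_congr
    intro a ha
    obtain ⟨ha1, hadvd⟩ := (pv_mem_divs hsz).mp ha
    obtain ⟨hm1, hmdvd⟩ := pv_div_fact hsz ha1 hadvd
    apply List.flatMap_congr
    intro c hc
    obtain ⟨hc1, hcdvd⟩ := (pv_mem_divs hm1).mp hc
    obtain ⟨hf1, -⟩ := pv_div_fact hm1 hc1 hcdvd
    exact pv_body_eq _ _ _ hc1 hf1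
  · have hfind : find_HNF_diagonal size = [] := by
      unfold find_HNF_diagonal
      rw [PySem.List.pyRange_one_eq_nil (by omega)]
      rfl
    unfold base_ortho_2 base_ortho_2_alt
    rw [hfind, if_pos (by omega : size < 1)]
    rfl
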